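-- pv_equiv track=rewrite | github.com/pianistprogrammer/ABC2VEC | abc2vec/tokenizer.py | split_into_bars
-- ===== SOURCE A (Python) =====
-- def split_into_bars(abc_body):
--     body = abc_body.strip()
--     bars = []
--     current_bar = []
--     i = 0
--     while i < len(body):
--         ch = body[i]
--         if ch == "|":
--             bar_str = "".join(current_bar).strip()
--             if bar_str:
--                 bars.append(bar_str)
--             current_bar = []
--             if i + 1 < len(body) and body[i + 1] in ":|]":
--                 i += 2
--                 continue
--         elif ch == ":" and i + 1 < len(body) and body[i + 1] == "|":
--             bar_str = "".join(current_bar).strip()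
--             if bar_str:
--                 bars.append(bar_str)
--             current_bar = []
--             i += 2
--             continue
--         else:
--             current_bar.append(ch)
--         i += 1
--     bar_str = "".join(current_bar).strip()
--     if bar_str:
--         bars.append(bar_str)
--     return bars
-- ===== SOURCE B (Python) =====
-- def split_into_bars(abc_body):
--     body = abc_body.strip()
--     n = len(body)
--     parts = []
--     start = i = 0
--     while i < n:
--         if body.startswith(':|', i):
--             step = 2
--         elif body[i] == '|':
--             step = 2 if i + 1 < n and body[i + 1] in ':|]' else 1
--         else:
--             i += 1
--             continue
--         parts.append(body[start:i])
--         start = i = i + step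
--     parts.append(body[start:])
--     return [t for p in parts if (t := p.strip())]
-- ===== Notes on version B (the rewrite author's own statement) =====
-- stated objective: simpler
-- what changed: A's single state machine that strips and filters each bar inline while accumulating characters is replaced by a plain two-phase splitter: first cut the raw segments between the delimiters (':|', and '|' with an optional following ':'/'|'/']'), then strip and drop empties in one comprehension.
import Mathlib
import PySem

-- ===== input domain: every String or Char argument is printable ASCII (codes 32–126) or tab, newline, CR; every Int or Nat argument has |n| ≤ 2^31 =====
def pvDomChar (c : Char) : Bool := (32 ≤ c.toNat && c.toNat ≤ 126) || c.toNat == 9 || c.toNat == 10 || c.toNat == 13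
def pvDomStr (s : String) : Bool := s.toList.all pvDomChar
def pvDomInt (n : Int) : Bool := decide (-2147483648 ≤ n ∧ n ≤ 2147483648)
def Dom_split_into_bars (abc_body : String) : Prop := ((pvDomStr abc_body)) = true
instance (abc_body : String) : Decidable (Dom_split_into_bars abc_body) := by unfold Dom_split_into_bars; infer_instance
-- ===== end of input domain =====

-- B replaces A's state machine (inline strip/filter at every delimiter, char-accumulator) by a
-- plain splitter that first cuts the raw segments between delimiters and then strips/filters
-- them in one comprehension (objective: simpler decomposition; same cost).

-- ===== PORT A =====
-- A's while-loop over body[i] with i+1 lookahead, transliterated as recursion on the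
-- remaining character list (body[i] = head, body[i+1] = head of rest); "".join(cur).strip()
-- = PySem.Str.strip (String.mk cur); 'if bar_str:' = nonemptiness.
-- A's repeated three-line block 'bar_str = "".join(current_bar).strip(); if bar_str:
-- bars.append(bar_str)' as a helper (it occurs verbatim at every delimiter and at the end).
def pvAppendBar (bars : List String) (cur : List Char) : List String :=
  let b := PySem.Str.strip (String.mk cur)
  if b = "" then bars else bars ++ [b]

def pvGoA : List Char → List Char → List String → List String
  | [], cur, bars => pvAppendBar bars cur
  | '|' :: d :: rest', cur, bars =>
      if d = ':' ∨ d = '|' ∨ d = ']' then pvGoA rest' [] (pvAppendBar bars cur)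
      else pvGoA (d :: rest') [] (pvAppendBar bars cur)
  | ['|'], cur, bars => pvGoA [] [] (pvAppendBar bars cur)
  | ':' :: '|' :: rest', cur, bars => pvGoA rest' [] (pvAppendBar bars cur)
  | c :: rest, cur, bars => pvGoA rest (cur ++ [c]) bars
  termination_by l _ _ => l.length
  decreasing_by all_goals simp

def split_into_bars (abc_body : String) : List String :=
  pvGoA (PySem.Str.strip abc_body).toList [] []

-- ===== PORT B =====
-- B's index scanner, transliterated on the remaining character list: body.startswith(':|', i)
-- = the list starting with ':','|'; the span body[start:i] is carried as the accumulated
-- segment seg (same characters).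
def pvGoB : List Char → List Char → List (List Char)
  | [], seg => [seg]
  | ':' :: '|' :: rest, seg => seg :: pvGoB rest []
  | '|' :: rest, seg =>
      seg ::
        (if (match rest with
             | d :: _ => d = ':' || d = '|' || d = ']'
             | [] => false) then pvGoB rest.tail [] else pvGoB rest [])
  | c :: rest, seg => pvGoB rest (seg ++ [c])
  termination_by l _ => l.length
  decreasing_by all_goals simp [List.length_tail]

def split_into_bars_alt (abc_body : String) : List String :=
  (pvGoB (PySem.Str.strip abc_body).toList []).filterMap
    (fun p => let t := PySem.Str.strip (String.mk p);
              if t = "" then none else some t)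

-- ===== PRECONDITION & SPEC =====
def Spec_split_into_bars (abc_body : String) (out : List String) : Prop := out = split_into_bars_alt abc_body
instance (abc_body : String) (out : List String) : Decidable (Spec_split_into_bars abc_body out) := by unfold Spec_split_into_bars; infer_instance

-- ===== CLAIM (what is proved, stated in full; the proofs are below) =====
def Claim_equal_split_into_bars : Prop := ∀ (abc_body : String), Dom_split_into_bars abc_body → Spec_split_into_bars abc_body (split_into_bars abc_body)

-- ===== LEMMAS AND PROOFS =====

def pvF (p : List Char) : Option String :=
  let t := PySem.Str.strip (String.mk p)
  if t = "" then none else some t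

theorem pvAppendBar_filterMap (bars : List String) (cur : List Char) (L : List (List Char)) :
    pvAppendBar bars cur ++ L.filterMap pvF = bars ++ ((cur :: L).filterMap pvF) := by
  unfold pvAppendBar pvF
  by_cases h : PySem.Str.strip (String.mk cur) = "" <;> simp [h]

theorem pvGoA_eq_goB : ∀ (l cur : List Char) (bars : List String),
    pvGoA l cur bars = bars ++ (pvGoB l cur).filterMap pvF := by
  intro l cur bars
  fun_induction pvGoA l cur bars with
  | case1 cur bars =>
      have := pvAppendBar_filterMap bars cur []
      simpa [pvGoB] using this
  | case2 d rest' cur bars h ih =>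
      rw [ih, pvAppendBar_filterMap]
      rcases h with h | h | h <;> subst h <;> simp [pvGoB]
  | case3 d rest' cur bars h ih =>
      rw [ih, pvAppendBar_filterMap]
      simp only [not_or] at h
      simp [pvGoB, h.1, h.2.1, h.2.2]
  | case4 cur bars ih =>
      rw [ih, show pvGoB ([] : List Char) [] = [[]] from by simp [pvGoB],
         pvAppendBar_filterMap]
      simp [pvGoB]
  | case5 rest' cur bars ih =>
      rw [ih, pvAppendBar_filterMap]
      simp [pvGoB]
  | case6 c rest cur bars h1 h2 h3 ih =>
      rw [ih]
      have hc : c ≠ '|' := by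
        intro h
        cases rest with
        | nil => exact h2 h rfl
        | cons d r => exact h1 d r h rfl
      have hcc : ∀ rest'', rest = '|' :: rest'' → c ≠ ':' :=
        fun r'' hr hc' => h3 r'' hc' hr
      rw [pvGoB.eq_def]
      split <;> simp_all [pvGoB]
      conv_rhs => rw [pvGoB.eq_def]
      simp

-- ===== VERDICT (by name: the statement is the Claim_ definition above) =====
theorem split_into_bars_spec : Claim_equal_split_into_bars := by
  intro s _
  unfold Spec_split_into_bars split_into_bars split_into_bars_alt
  rw [pvGoA_eq_goB]
  simp [pvF]
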